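-- pv_equiv track=rewrite | github.com/Mrakooo/Laboratories | Task_4_2/stuff_(not_used)/Task.py | find_edrpou_info
-- ===== SOURCE A (Python) =====
-- def find_edrpou_info(zvo_list, key_of_info=""):
--     index = 0
--     list_whole_info = []
--     list_edrpou_info = []
--     list_rector_info = []
--     new_dict = {}
--     university_financing_type_name = ""
--     registration_year = ""
--     for i in zvo_list:
--         new_dict.update(zvo_list[index])
--         university_name = new_dict['university_name']
--         university_edrpou = new_dict['university_edrpou']
--         if "1" in key_of_info:
--             university_financing_type_name = new_dict['university_financing_type_name']
--             if university_financing_type_name != 'Державна':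
--                 university_financing_type_name = ""
--         university_director_fio = new_dict['university_director_fio']
--         if "3" in key_of_info:
--             registration_year = new_dict['registration_year']
--             try:
--                 if not (int(registration_year) >=1950 and int(registration_year) <= 1999):
--                     registration_year = ""
--             except TypeError:
--                 registration_year = ""
--         new_dict.clear()
--         new_list_whole_info = [university_name, university_edrpou, university_director_fio, university_financing_type_name, registration_year]
--         new_list_edrpou_info = [university_name, university_edrpou]
--         new_list_rector_info = [university_name, university_director_fio]
--         list_whole_info.append(new_list_whole_info)
--         list_edrpou_info.append(new_list_edrpou_info)
--         list_rector_info.append(new_list_rector_info)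
--         index += 1
--     return list_whole_info, list_edrpou_info, list_rector_info
-- ===== SOURCE B (Python) =====
-- def _year_ok(y):
--     try:
--         return 1950 <= int(y) <= 1999
--     except TypeError:
--         return False
--
--
-- def find_edrpou_info(zvo_list, key_of_info=""):
--     # Column-oriented: build the five field columns each by its own pass,
--     # then zip the columns into the result rows.
--     names = [d['university_name'] for d in zvo_list]
--     edrpous = [d['university_edrpou'] for d in zvo_list]
--     fios = [d['university_director_fio'] for d in zvo_list]
--     if "1" in key_of_info:
--         fins = [d['university_financing_type_name'] for d in zvo_list]
--         fins = [f if f == 'Державна' else "" for f in fins]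
--     else:
--         fins = [""] * len(zvo_list)
--     if "3" in key_of_info:
--         years = [d['registration_year'] for d in zvo_list]
--         years = [y if _year_ok(y) else "" for y in years]
--     else:
--         years = [""] * len(zvo_list)
--     list_whole_info = [list(t) for t in zip(names, edrpous, fios, fins, years)]
--     list_edrpou_info = [list(t) for t in zip(names, edrpous)]
--     list_rector_info = [list(t) for t in zip(names, fios)]
--     return list_whole_info, list_edrpou_info, list_rector_info
-- ===== Notes on version B (the rewrite author's own statement) =====
-- stated objective: alternative
-- what changed: B is column-oriented: it builds the five field columns by separate per-field passes (names, edrpous, fios, flag-gated fins and years) and then zips the columns into the three row lists, instead of A's single row-by-row loop with an index counter and a shared dict it updates and clears each iteration.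
import Mathlib
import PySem

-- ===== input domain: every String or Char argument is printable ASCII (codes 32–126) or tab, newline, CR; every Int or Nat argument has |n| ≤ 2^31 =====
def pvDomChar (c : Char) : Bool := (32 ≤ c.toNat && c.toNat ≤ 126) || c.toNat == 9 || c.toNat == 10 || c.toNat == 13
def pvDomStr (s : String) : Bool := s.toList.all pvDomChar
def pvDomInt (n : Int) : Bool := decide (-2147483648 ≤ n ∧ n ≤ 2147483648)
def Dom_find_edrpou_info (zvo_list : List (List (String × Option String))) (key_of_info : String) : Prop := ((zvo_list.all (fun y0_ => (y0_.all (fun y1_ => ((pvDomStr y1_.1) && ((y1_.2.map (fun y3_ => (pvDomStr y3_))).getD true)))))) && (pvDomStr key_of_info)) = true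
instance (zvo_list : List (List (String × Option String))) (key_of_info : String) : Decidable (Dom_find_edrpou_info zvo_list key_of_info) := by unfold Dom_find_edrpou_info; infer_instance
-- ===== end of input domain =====

-- B is column-oriented (five per-field passes, then zip the columns into rows) instead of A's
-- row-by-row loop with an index counter and a shared dict updated and cleared each iteration;
-- objective: alternative, same cost.

-- ===== PORT A =====
-- d[k] on the per-iteration dict; KeyError (missing key) is excluded by Pre_, dummy `none` there.
def pvGetItem (d : PySem.Dict String (Option String)) (k : String) : Option String :=
  (d.get? k).getD none

-- state: (whole, edrpou, rector, financing, year) — index is only used as zvo_list[index] = i,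
-- and new_dict is cleared each iteration, so it is Dict.update Dict.empty i here.
def find_edrpou_info (zvo_list : List (List (String × Option String))) (key_of_info : String) : List (List String) × List (List String) × List (List String) :=
  let st := zvo_list.foldl
    (fun (st : List (List String) × List (List String) × List (List String) × String × String) i =>
      let (list_whole, list_edrpou, list_rector, fin0, yr0) := st
      let new_dict := PySem.Dict.update PySem.Dict.empty i
      let university_name := (pvGetItem new_dict "university_name").getD ""            -- None excluded by Pre_
      let university_edrpou := (pvGetItem new_dict "university_edrpou").getD ""        -- None excluded by Pre_
      let fin :=
        if PySem.Str.isIn "1" key_of_info then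
          let f := pvGetItem new_dict "university_financing_type_name"
          if f == some "Державна" then "Державна" else ""
        else fin0
      let university_director_fio := (pvGetItem new_dict "university_director_fio").getD ""  -- None excluded by Pre_
      let yr :=
        if PySem.Str.isIn "3" key_of_info then
          match pvGetItem new_dict "registration_year" with
          | none => ""                                   -- int(None): TypeError, caught → ""
          | some s =>
            match PySem.Int.ofStr? s with
            | none => ""                                 -- ValueError: uncaught, excluded by Pre_
            | some n => if 1950 ≤ n ∧ n ≤ 1999 then s else ""
        else yr0
      (list_whole ++ [[university_name, university_edrpou, university_director_fio, fin, yr]],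
       list_edrpou ++ [[university_name, university_edrpou]],
       list_rector ++ [[university_name, university_director_fio]],
       fin, yr))
    ([], [], [], "", "")
  (st.1, st.2.1, st.2.2.1)

-- ===== PORT B =====
-- uni[k] on the element dict itself (same KeyError/None exclusions as in port A).
def pvLook (uni : List (String × Option String)) (k : String) : Option String :=
  ((PySem.Dict.ofList uni).get? k).getD none

-- _year_ok: int(None) raises TypeError (caught → False); a non-int string raises ValueError,
-- which propagates in Python — those inputs are excluded by Pre_, dummy `false` here.
def pvYearOk (y : Option String) : Bool :=
  match y with
  | none => false
  | some s =>
    match PySem.Int.ofStr? s with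
    | none => false
    | some n => decide (1950 ≤ n ∧ n ≤ 1999)

def find_edrpou_info_alt (zvo_list : List (List (String × Option String))) (key_of_info : String) : List (List String) × List (List String) × List (List String) :=
  let names := zvo_list.map (fun d => (pvLook d "university_name").getD "")            -- None excluded by Pre_
  let edrpous := zvo_list.map (fun d => (pvLook d "university_edrpou").getD "")        -- None excluded by Pre_
  let fios := zvo_list.map (fun d => (pvLook d "university_director_fio").getD "")     -- None excluded by Pre_
  let fins :=
    if PySem.Str.isIn "1" key_of_info then
      (zvo_list.map (fun d => pvLook d "university_financing_type_name")).map
        (fun f => if f == some "Державна" then "Державна" else "")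
    else List.replicate zvo_list.length ""
  let years :=
    if PySem.Str.isIn "3" key_of_info then
      (zvo_list.map (fun d => pvLook d "registration_year")).map
        (fun y => if pvYearOk y then y.getD "" else "")
    else List.replicate zvo_list.length ""
  let list_whole_info :=
    List.zipWith (fun n r => n :: r) names
      (List.zipWith (fun e r => e :: r) edrpous
        (List.zipWith (fun f r => f :: r) fios
          (List.zipWith (fun fi y => [fi, y]) fins years)))
  let list_edrpou_info := List.zipWith (fun n e => [n, e]) names edrpous
  let list_rector_info := List.zipWith (fun n f => [n, f]) names fios
  (list_whole_info, list_edrpou_info, list_rector_info)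

-- ===== PRECONDITION & SPEC =====
-- Pre_ excludes ONLY inputs where A raises (KeyError on a missing required key; ValueError from
-- int() on a non-integer registration_year string when '3' is in key_of_info) and inputs where a
-- required field is None, where A's return contains None and so is not a value of the declared
-- type list[list[str]] (unrepresentable in the Lean output type).
def pvOkRow (uni : List (String × Option String)) (key_of_info : String) : Bool :=
  (((PySem.Dict.ofList uni).get? "university_name").getD none).isSome &&
  (((PySem.Dict.ofList uni).get? "university_edrpou").getD none).isSome &&
  (((PySem.Dict.ofList uni).get? "university_director_fio").getD none).isSome &&
  (!(PySem.Str.isIn "1" key_of_info) || ((PySem.Dict.ofList uni).get? "university_financing_type_name").isSome) &&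
  (!(PySem.Str.isIn "3" key_of_info) ||
    (match (PySem.Dict.ofList uni).get? "registration_year" with
     | none => false
     | some none => true
     | some (some s) => (PySem.Int.ofStr? s).isSome))

def Pre_find_edrpou_info (zvo_list : List (List (String × Option String))) (key_of_info : String) : Prop :=
  zvo_list.all (fun uni => pvOkRow uni key_of_info) = true

instance (zvo_list : List (List (String × Option String))) (key_of_info : String) : Decidable (Pre_find_edrpou_info zvo_list key_of_info) := by unfold Pre_find_edrpou_info; infer_instance

def pvWitness_find_edrpou_info : (List (List (String × Option String))) × String :=
  ([[("university_name", some "N"), ("university_edrpou", some "E"),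
     ("university_director_fio", some "D"), ("registration_year", some "1960")]], "3")

def Spec_find_edrpou_info (zvo_list : List (List (String × Option String))) (key_of_info : String) (out : List (List String) × List (List String) × List (List String)) : Prop := out = find_edrpou_info_alt zvo_list key_of_info
instance (zvo_list : List (List (String × Option String))) (key_of_info : String) (out : List (List String) × List (List String) × List (List String)) : Decidable (Spec_find_edrpou_info zvo_list key_of_info out) := by unfold Spec_find_edrpou_info; infer_instance

-- ===== CLAIM (what is proved, stated in full; the proofs are below) =====
def Claim_equal_find_edrpou_info : Prop := ∀ (zvo_list : List (List (String × Option String))) (key_of_info : String), Dom_find_edrpou_info zvo_list key_of_info → Pre_find_edrpou_info zvo_list key_of_info → Spec_find_edrpou_info zvo_list key_of_info (find_edrpou_info zvo_list key_of_info)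

-- ===== LEMMAS AND PROOFS =====

-- The common per-element row both sides are reduced to.
def pvRow (use_fin use_year : Bool) (uni : List (String × Option String)) : List String :=
  [(pvLook uni "university_name").getD "", (pvLook uni "university_edrpou").getD "",
   (pvLook uni "university_director_fio").getD "",
   (if use_fin then (if pvLook uni "university_financing_type_name" == some "Державна" then "Державна" else "") else ""),
   (if use_year then (if pvYearOk (pvLook uni "registration_year") then (pvLook uni "registration_year").getD "" else "") else "")]

-- A's fold, named for the induction.
def pvStepA (key_of_info : String)
    (st : List (List String) × List (List String) × List (List String) × String × String)
    (i : List (String × Option String)) :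
    List (List String) × List (List String) × List (List String) × String × String :=
  let (list_whole, list_edrpou, list_rector, fin0, yr0) := st
  let new_dict := PySem.Dict.update PySem.Dict.empty i
  let university_name := (pvGetItem new_dict "university_name").getD ""
  let university_edrpou := (pvGetItem new_dict "university_edrpou").getD ""
  let fin :=
    if PySem.Str.isIn "1" key_of_info then
      let f := pvGetItem new_dict "university_financing_type_name"
      if f == some "Державна" then "Державна" else ""
    else fin0
  let university_director_fio := (pvGetItem new_dict "university_director_fio").getD ""
  let yr :=
    if PySem.Str.isIn "3" key_of_info then
      match pvGetItem new_dict "registration_year" with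
      | none => ""
      | some s =>
        match PySem.Int.ofStr? s with
        | none => ""
        | some n => if 1950 ≤ n ∧ n ≤ 1999 then s else ""
    else yr0
  (list_whole ++ [[university_name, university_edrpou, university_director_fio, fin, yr]],
   list_edrpou ++ [[university_name, university_edrpou]],
   list_rector ++ [[university_name, university_director_fio]],
   fin, yr)

lemma find_edrpou_info_eq_fold (zvo_list : List (List (String × Option String))) (key_of_info : String) :
    find_edrpou_info zvo_list key_of_info =
      (let st := zvo_list.foldl (pvStepA key_of_info) ([], [], [], "", "");
       (st.1, st.2.1, st.2.2.1)) := rfl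

-- Dict.update Dict.empty i = Dict.ofList i, so A's per-iteration lookups are B's pvLook.
lemma pvGetItem_update_empty (i : List (String × Option String)) (k : String) :
    pvGetItem (PySem.Dict.update PySem.Dict.empty i) k = pvLook i k := by
  simp [pvGetItem, pvLook, PySem.Dict.ofList, PySem.Dict.update]

-- A's match-style year computation is the pvYearOk form.
lemma pvYearA_eq (o : Option String) :
    (match o with
     | none => ""
     | some s =>
       match PySem.Int.ofStr? s with
       | none => ""
       | some n => if 1950 ≤ n ∧ n ≤ 1999 then s else "") =
    (if pvYearOk o then o.getD "" else "") := by
  cases o with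
  | none => rfl
  | some s =>
    cases h : PySem.Int.ofStr? s with
    | none => simp [pvYearOk, h]
    | some n => by_cases hr : 1950 ≤ n ∧ n ≤ 1999 <;> simp [pvYearOk, h, hr]

-- One step of A's fold appends exactly the common row (and its two projections), provided the
-- carried financing/year strings are "" whenever their branch is off (they then stay "").
lemma pvStepA_eq (key_of_info : String) (w e r : List (List String)) (fin yr : String)
    (hf : PySem.Str.isIn "1" key_of_info = false → fin = "")
    (hy : PySem.Str.isIn "3" key_of_info = false → yr = "")
    (i : List (String × Option String)) :
    pvStepA key_of_info (w, e, r, fin, yr) i =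
      (w ++ [pvRow (PySem.Str.isIn "1" key_of_info) (PySem.Str.isIn "3" key_of_info) i],
       e ++ [[(pvLook i "university_name").getD "", (pvLook i "university_edrpou").getD ""]],
       r ++ [[(pvLook i "university_name").getD "", (pvLook i "university_director_fio").getD ""]],
       (pvRow (PySem.Str.isIn "1" key_of_info) (PySem.Str.isIn "3" key_of_info) i).getD 3 "",
       (pvRow (PySem.Str.isIn "1" key_of_info) (PySem.Str.isIn "3" key_of_info) i).getD 4 "") := by
  have h1c : PySem.Chars.isIn ['1'] key_of_info.toList = PySem.Str.isIn "1" key_of_info := by simp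
  have h3c : PySem.Chars.isIn ['3'] key_of_info.toList = PySem.Str.isIn "3" key_of_info := by simp
  cases h1 : PySem.Str.isIn "1" key_of_info <;> cases h3 : PySem.Str.isIn "3" key_of_info <;>
    first
      | simp [pvStepA, pvRow, pvGetItem_update_empty, h1c.trans h1, h3c.trans h3, hf h1, hy h3]
      | simp [pvStepA, pvRow, pvGetItem_update_empty, pvYearA_eq, h1c.trans h1, h3c.trans h3, hf h1]
      | simp [pvStepA, pvRow, pvGetItem_update_empty, h1c.trans h1, h3c.trans h3, hy h3]
      | simp [pvStepA, pvRow, pvGetItem_update_empty, pvYearA_eq, h1c.trans h1, h3c.trans h3]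

-- The invariant for A's whole fold.
lemma pvFoldA_inv (key_of_info : String) (l : List (List (String × Option String)))
    (w e r : List (List String)) (fin yr : String)
    (hf : PySem.Str.isIn "1" key_of_info = false → fin = "")
    (hy : PySem.Str.isIn "3" key_of_info = false → yr = "") :
    (l.foldl (pvStepA key_of_info) (w, e, r, fin, yr)).1 =
        w ++ l.map (pvRow (PySem.Str.isIn "1" key_of_info) (PySem.Str.isIn "3" key_of_info)) ∧
    (l.foldl (pvStepA key_of_info) (w, e, r, fin, yr)).2.1 =
        e ++ l.map (fun i => [(pvLook i "university_name").getD "", (pvLook i "university_edrpou").getD ""]) ∧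
    (l.foldl (pvStepA key_of_info) (w, e, r, fin, yr)).2.2.1 =
        r ++ l.map (fun i => [(pvLook i "university_name").getD "", (pvLook i "university_director_fio").getD ""]) := by
  induction l generalizing w e r fin yr with
  | nil => simp
  | cons i t ih =>
    rw [List.foldl_cons, pvStepA_eq key_of_info w e r fin yr hf hy i]
    have hf' : PySem.Str.isIn "1" key_of_info = false →
        (pvRow (PySem.Str.isIn "1" key_of_info) (PySem.Str.isIn "3" key_of_info) i).getD 3 "" = "" := by
      intro h
      have hc : PySem.Chars.isIn ['1'] key_of_info.toList = false :=
        (by simp : PySem.Chars.isIn ['1'] key_of_info.toList = PySem.Str.isIn "1" key_of_info).trans h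
      simp [pvRow, hc]
    have hy' : PySem.Str.isIn "3" key_of_info = false →
        (pvRow (PySem.Str.isIn "1" key_of_info) (PySem.Str.isIn "3" key_of_info) i).getD 4 "" = "" := by
      intro h
      have hc : PySem.Chars.isIn ['3'] key_of_info.toList = false :=
        (by simp : PySem.Chars.isIn ['3'] key_of_info.toList = PySem.Str.isIn "3" key_of_info).trans h
      simp [pvRow, hc]
    obtain ⟨h1, h2, h3⟩ := ih _ _ _ _ _ hf' hy'
    refine ⟨?_, ?_, ?_⟩
    · rw [h1]; simp
    · rw [h2]; simp
    · rw [h3]; simp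

-- zipWith over two maps of the SAME list collapses to one map.
lemma pvZipWithMap {α β γ δ : Type} (g : β → γ → δ) (f1 : α → β) (f2 : α → γ) (l : List α) :
    List.zipWith g (l.map f1) (l.map f2) = l.map (fun x => g (f1 x) (f2 x)) := by
  induction l with
  | nil => rfl
  | cons a t ih => simp [ih]

-- B's columns zipped back together are the per-element common rows.
lemma find_edrpou_info_alt_eq_maps (zvo_list : List (List (String × Option String))) (key_of_info : String) :
    find_edrpou_info_alt zvo_list key_of_info =
      (zvo_list.map (pvRow (PySem.Str.isIn "1" key_of_info) (PySem.Str.isIn "3" key_of_info)),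
       zvo_list.map (fun i => [(pvLook i "university_name").getD "", (pvLook i "university_edrpou").getD ""]),
       zvo_list.map (fun i => [(pvLook i "university_name").getD "", (pvLook i "university_director_fio").getD ""])) := by
  have hrep : List.replicate zvo_list.length "" = zvo_list.map (fun _ => "") := by
    simp
  cases h1 : PySem.Str.isIn "1" key_of_info <;> cases h3 : PySem.Str.isIn "3" key_of_info <;>
    simp only [find_edrpou_info_alt, h1, h3, if_true, if_false, Bool.false_eq_true, hrep,
      List.map_map, pvZipWithMap, Function.comp] <;> rfl

-- ===== VERDICT (by name: the statement is the Claim_ definition above) =====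
theorem find_edrpou_info_spec : Claim_equal_find_edrpou_info := by
  intro zvo_list key_of_info _ _
  show find_edrpou_info zvo_list key_of_info = find_edrpou_info_alt zvo_list key_of_info
  rw [find_edrpou_info_eq_fold, find_edrpou_info_alt_eq_maps]
  obtain ⟨h1, h2, h3⟩ := pvFoldA_inv key_of_info zvo_list [] [] [] "" ""
    (fun _ => rfl) (fun _ => rfl)
  simp only []
  rw [Prod.mk.injEq, Prod.mk.injEq]
  exact ⟨by simpa using h1, by simpa using h2, by simpa using h3⟩
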